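-- pv_equiv track=rewrite | github.com/Omnipro-Solutions/saas-app-oms | omni_pro_oms/task/task_api.py | get_task_status_from_request_status_code
-- ===== SOURCE A (Python) =====
-- def get_task_status_from_request_status_code(status_codes):
--     successful = all(status >= 200 and status < 300 for status in status_codes)
--     unsuccessful = all(status >= 400 for status in status_codes)
--
--     if successful and not unsuccessful:
--         return "success"
--     elif unsuccessful and not successful:
--         return "error"
--     else:
--         return "partial_success"
-- ===== SOURCE B (Python) =====
-- def get_task_status_from_request_status_code(status_codes):
--     labels = {"success" if 200 <= s < 300 else "error" if s >= 400 else "other"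
--               for s in status_codes}
--     if labels == {"success"}:
--         return "success"
--     if labels == {"error"}:
--         return "error"
--     return "partial_success"
-- ===== Notes on version B (the rewrite author's own statement) =====
-- stated objective: idiomatic
-- what changed: Replaces A's two separate all() scans and boolean cross-check with a single pass that maps each code to a category label, collects the distinct labels into a set, and compares the set against {'success'} / {'error'}.
import Mathlib
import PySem

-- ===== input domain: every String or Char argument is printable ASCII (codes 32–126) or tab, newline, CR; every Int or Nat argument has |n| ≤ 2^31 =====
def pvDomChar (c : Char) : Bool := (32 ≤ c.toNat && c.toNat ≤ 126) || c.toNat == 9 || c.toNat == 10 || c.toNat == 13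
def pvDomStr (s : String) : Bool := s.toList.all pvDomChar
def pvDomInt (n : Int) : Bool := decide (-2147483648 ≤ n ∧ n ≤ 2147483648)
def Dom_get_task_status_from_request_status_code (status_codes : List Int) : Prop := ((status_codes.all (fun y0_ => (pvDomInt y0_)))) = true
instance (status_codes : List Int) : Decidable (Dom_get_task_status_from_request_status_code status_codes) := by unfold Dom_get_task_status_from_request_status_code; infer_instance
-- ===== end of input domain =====

-- B replaces A's two all() scans with one labelling pass collected into a set; objective: idiomatic.

-- ===== PORT A =====
def get_task_status_from_request_status_code (status_codes : List Int) : String :=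
  let successful := status_codes.all (fun status => decide (200 ≤ status) && decide (status < 300))
  let unsuccessful := status_codes.all (fun status => decide (400 ≤ status))
  if successful && !unsuccessful then "success"
  else if unsuccessful && !successful then "error"
  else "partial_success"

-- ===== PORT B =====
def pvLabel (s : Int) : String :=
  if 200 ≤ s ∧ s < 300 then "success" else if 400 ≤ s then "error" else "other"

def get_task_status_from_request_status_code_alt (status_codes : List Int) : String :=
  let labels : PySem.Set String := PySem.Set.ofList (status_codes.map pvLabel)
  if PySem.Set.equal labels ["success"] then "success"
  else if PySem.Set.equal labels ["error"] then "error"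
  else "partial_success"

-- ===== PRECONDITION & SPEC =====
def Spec_get_task_status_from_request_status_code (status_codes : List Int) (out : String) : Prop := out = get_task_status_from_request_status_code_alt status_codes
instance (status_codes : List Int) (out : String) : Decidable (Spec_get_task_status_from_request_status_code status_codes out) := by unfold Spec_get_task_status_from_request_status_code; infer_instance

-- ===== CLAIM (what is proved, stated in full; the proofs are below) =====
def Claim_equal_get_task_status_from_request_status_code : Prop := ∀ (status_codes : List Int), Dom_get_task_status_from_request_status_code status_codes → Spec_get_task_status_from_request_status_code status_codes (get_task_status_from_request_status_code status_codes)

-- ===== LEMMAS AND PROOFS =====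

-- set(labels) == {lab} iff every label is lab and some element exists
theorem pv_equal_singleton {L : List String} {lab : String} :
    PySem.Set.equal (PySem.Set.ofList L) [lab] = true ↔ ((∀ x ∈ L, x = lab) ∧ lab ∈ L) := by
  simp [PySem.Set.equal, PySem.Set.issubset, PySem.Set.contains, PySem.Set.mem_ofList]

theorem pv_label_success (s : Int) : pvLabel s = "success" ↔ (200 ≤ s ∧ s < 300) := by
  unfold pvLabel; split_ifs with h1 h2 <;> simp_all

theorem pv_label_error (s : Int) : pvLabel s = "error" ↔ (¬(200 ≤ s ∧ s < 300) ∧ 400 ≤ s) := by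
  unfold pvLabel; split_ifs with h1 h2 <;> simp_all

theorem pv_main (xs : List Int) :
    get_task_status_from_request_status_code xs = get_task_status_from_request_status_code_alt xs := by
  cases xs with
  | nil => rfl
  | cons a t =>
    simp only [get_task_status_from_request_status_code, get_task_status_from_request_status_code_alt]
    have hsucc : PySem.Set.equal (PySem.Set.ofList ((a :: t).map pvLabel)) ["success"] = true
        ↔ (∀ x ∈ a :: t, 200 ≤ x ∧ x < 300) := by
      rw [pv_equal_singleton]
      constructor
      · intro ⟨h1, _⟩ x hx
        exact (pv_label_success x).mp (h1 _ (List.mem_map_of_mem hx))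
      · intro h
        refine ⟨?_, ?_⟩
        · intro x hx
          obtain ⟨y, hy, rfl⟩ := List.mem_map.mp hx
          exact (pv_label_success y).mpr (h y hy)
        · exact List.mem_map.mpr ⟨a, List.mem_cons_self, (pv_label_success a).mpr (h a List.mem_cons_self)⟩
    have herr : PySem.Set.equal (PySem.Set.ofList ((a :: t).map pvLabel)) ["error"] = true
        ↔ (∀ x ∈ a :: t, 400 ≤ x) := by
      rw [pv_equal_singleton]
      constructor
      · intro ⟨h1, _⟩ x hx
        exact ((pv_label_error x).mp (h1 _ (List.mem_map_of_mem hx))).2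
      · intro h
        refine ⟨?_, ?_⟩
        · intro x hx
          obtain ⟨y, hy, rfl⟩ := List.mem_map.mp hx
          exact (pv_label_error y).mpr ⟨by have := h y hy; omega, h y hy⟩
        · exact List.mem_map.mpr ⟨a, List.mem_cons_self,
            (pv_label_error a).mpr ⟨by have := h a List.mem_cons_self; omega, h a List.mem_cons_self⟩⟩
    have hA : ((a :: t).all (fun status => decide (200 ≤ status) && decide (status < 300)) = true)
        ↔ (∀ x ∈ a :: t, 200 ≤ x ∧ x < 300) := by
      simp [List.all_eq_true]
    have hB : ((a :: t).all (fun status => decide (400 ≤ status)) = true)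
        ↔ (∀ x ∈ a :: t, 400 ≤ x) := by
      simp [List.all_eq_true]
    have e1 : PySem.Set.equal (PySem.Set.ofList ((a :: t).map pvLabel)) ["success"]
        = ((a :: t).all (fun status => decide (200 ≤ status) && decide (status < 300))
           && !(a :: t).all (fun status => decide (400 ≤ status))) := by
      rw [Bool.eq_iff_iff, Bool.and_eq_true, Bool.not_eq_true']
      constructor
      · intro h
        have hp := hsucc.mp h
        refine ⟨hA.mpr hp, ?_⟩
        by_contra hq
        have hq' : (a :: t).all (fun status => decide (400 ≤ status)) = true := by
          cases h' : (a :: t).all (fun status => decide (400 ≤ status)) with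
          | false => exact absurd h' hq
          | true => rfl
        have h4 := hB.mp hq' a List.mem_cons_self
        have h2 := (hp a List.mem_cons_self).2
        omega
      · intro ⟨h1, _⟩
        exact hsucc.mpr (hA.mp h1)
    have e2 : PySem.Set.equal (PySem.Set.ofList ((a :: t).map pvLabel)) ["error"]
        = ((a :: t).all (fun status => decide (400 ≤ status))
           && !(a :: t).all (fun status => decide (200 ≤ status) && decide (status < 300))) := by
      rw [Bool.eq_iff_iff, Bool.and_eq_true, Bool.not_eq_true']
      constructor
      · intro h
        have hq := herr.mp h
        refine ⟨hB.mpr hq, ?_⟩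
        by_contra hp
        have hp' : (a :: t).all (fun status => decide (200 ≤ status) && decide (status < 300)) = true := by
          cases h' : (a :: t).all (fun status => decide (200 ≤ status) && decide (status < 300)) with
          | false => exact absurd h' hp
          | true => rfl
        have h2 := (hA.mp hp' a List.mem_cons_self).2
        have h4 := hq a List.mem_cons_self
        omega
      · intro ⟨h1, _⟩
        exact herr.mpr (hB.mp h1)
    rw [e1, e2]

-- ===== VERDICT (by name: the statement is the Claim_ definition above) =====
theorem get_task_status_from_request_status_code_spec : Claim_equal_get_task_status_from_request_status_code := by
  intro xs _
  unfold Spec_get_task_status_from_request_status_code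
  exact pv_main xs
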